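-- pv_equiv track=rewrite | github.com/topquark22/TheElements | to_elements.py | find_symbol_sequence
-- ===== SOURCE A (Python) =====
-- from dataclasses import dataclass
-- from typing import Dict, List, Optional, Sequence
--
-- @dataclass(frozen=True)
-- class Element:
--     symbol: str
--     name: str
--     atomic_id: str  # string to support isotope IDs like "1.2"
--
-- def normalize_text(text: str) -> str:
--     """Remove all whitespace characters (spaces, tabs, newlines, etc.)."""
--     return "".join(text.split())
--
-- def find_symbol_sequence(
--     text: str, lookup: Dict[str, Element], enable_isotopes: bool
-- ) -> Optional[List[str]]:
--     """
--     Return a list of element symbols that spell out `text`, or None if impossible.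
--
--     When isotopes are enabled, D and T are allowed but discouraged:
--     the algorithm prefers solutions that use fewer D/T tokens.
--     """
--     cleaned = normalize_text(text)
--     if not cleaned:
--         return []
--
--     target = cleaned.lower()
--     length = len(target)
--
--     # Best path and its isotope-cost at each index.
--     paths: List[Optional[List[str]]] = [None] * (length + 1)
--     costs: List[Optional[int]] = [None] * (length + 1)
--     paths[0] = []
--     costs[0] = 0
--
--     isotope_symbols = {"D", "T"} if enable_isotopes else set()
--
--     for index in range(length):
--         if paths[index] is None:
--             continue
--
--         for size in (1, 2):
--             end = index + size
--             if end > length: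
--                 continue
--
--             candidate = target[index:end].capitalize()
--             if candidate not in lookup:
--                 continue
--
--             step_cost = 1 if candidate in isotope_symbols else 0
--             new_cost = (costs[index] or 0) + step_cost
--             new_path = paths[index] + [candidate]
--
--             # Prefer fewer isotope uses; tie-breaker prefers fewer tokens.
--             if costs[end] is None or new_cost < costs[end]:
--                 costs[end] = new_cost
--                 paths[end] = new_path
--             elif new_cost == costs[end] and paths[end] is not None:
--                 if len(new_path) < len(paths[end]):
--                     paths[end] = new_path
--
--     return paths[length]
-- ===== SOURCE B (Python) =====
-- def find_symbol_sequence(text, lookup, enable_isotopes):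
--     """Two staged passes instead of path-carrying relaxation: a pull-style
--     value-only DP over (isotope_cost, token_count), then one backward walk that
--     re-derives each chosen token from the DP values (no paths, no backpointers)."""
--     cleaned = "".join(text.split())
--     if not cleaned:
--         return []
--     target = cleaned.lower()
--     n = len(target)
--     iso = {"D", "T"} if enable_isotopes else set()
--
--     def step(i, e):
--         """(symbol, cost) of using target[i:e] as one token, or None."""
--         sym = target[i:e].capitalize()
--         if sym not in lookup:
--             return None
--         return sym, (1 if sym in iso else 0)
--
--     # Pass 1: best[e] = (min isotope cost, min token count) spelling target[:e],
--     # each cell pulled from its two final predecessor cells.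
--     best = [None] * (n + 1)
--     best[0] = (0, 0)
--     for e in range(1, n + 1):
--         for i in (e - 2, e - 1):
--             if i < 0 or best[i] is None:
--                 continue
--             tok = step(i, e)
--             if tok is None:
--                 continue
--             cand = (best[i][0] + tok[1], best[i][1] + 1)
--             if best[e] is None or cand < best[e]:
--                 best[e] = cand
--     if best[n] is None:
--         return None
--
--     # Pass 2: walk back from n, taking the 2-char token whenever it accounts
--     # exactly for the value of the current cell (A's first-found preference).
--     out = []
--     j = n
--     while j > 0:
--         tok = step(j - 2, j) if j >= 2 else None
--         if (tok is not None and best[j - 2] is not None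
--                 and (best[j - 2][0] + tok[1], best[j - 2][1] + 1) == best[j]):
--             out.append(tok[0])
--             j -= 2
--         else:
--             out.append(step(j - 1, j)[0])
--             j -= 1
--     out.reverse()
--     return out
-- ===== Notes on version B (the rewrite author's own statement) =====
-- stated objective: faster
-- what changed: B replaces A's path-carrying push relaxation by two staged passes: a pull-style value-only DP storing just (isotope_cost, token_count) per cell, then a single backward walk that re-derives each token from the DP values, so no paths or backpointers are ever stored.
import Mathlib
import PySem

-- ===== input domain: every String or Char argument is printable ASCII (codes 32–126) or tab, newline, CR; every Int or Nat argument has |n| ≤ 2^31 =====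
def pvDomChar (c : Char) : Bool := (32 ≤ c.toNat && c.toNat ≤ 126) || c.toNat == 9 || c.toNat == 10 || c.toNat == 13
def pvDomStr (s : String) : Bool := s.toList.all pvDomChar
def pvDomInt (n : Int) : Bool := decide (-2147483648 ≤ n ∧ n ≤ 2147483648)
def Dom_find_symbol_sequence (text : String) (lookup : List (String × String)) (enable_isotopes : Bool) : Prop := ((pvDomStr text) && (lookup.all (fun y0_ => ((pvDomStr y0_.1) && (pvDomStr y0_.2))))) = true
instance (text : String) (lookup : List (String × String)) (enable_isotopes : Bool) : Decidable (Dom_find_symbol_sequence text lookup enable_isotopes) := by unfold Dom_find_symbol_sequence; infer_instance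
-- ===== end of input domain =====

-- B replaces A's path-carrying relaxation by a value-only DP (cost, token count)
-- plus one backward reconstruction pass (objective: faster, asymptotically less
-- path-copying work).

-- shared helpers (Python builtins / same-module code both versions call)

-- str.capitalize(): first char title-cased, rest lower-cased; exact on the ASCII domain
def pyCapitalize (cs : List Char) : List Char :=
  match cs with
  | [] => []
  | c :: rest => PySem.Chars.upperChar c :: PySem.Chars.lower rest

-- target[i:e].capitalize()
def fssCandidate (tgt : List Char) (i e : Nat) : String :=
  String.ofList (pyCapitalize (PySem.List.slice tgt (some (i : Int)) (some (e : Int))))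

-- normalize_text: "".join(text.split())
def normalize_text (text : String) : String :=
  PySem.Str.join "" (PySem.Str.split₀ text)

-- ===== PORT A =====

-- the body of the `for size in (1, 2)` loop
def fssA_inner (lookup : List (String × String)) (iso : PySem.Set String) (tgt : List Char)
    (n : Nat) (index : Nat)
    (st : List (Option (List String)) × List (Option Int)) (size : Nat) :
    List (Option (List String)) × List (Option Int) :=
  let e := index + size
  if n < e then st
  else
    let candidate := fssCandidate tgt index e
    if ¬ PySem.Dict.contains (PySem.Dict.mk lookup) candidate then st
    else
      let step_cost : Int := if PySem.Set.contains iso candidate then 1 else 0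
      let new_cost : Int := (st.2.getD index none).getD 0 + step_cost
      let new_path : List String := (st.1.getD index none).getD [] ++ [candidate]
      match st.2.getD e none with
      | none => (st.1.set e (some new_path), st.2.set e (some new_cost))
      | some ce =>
        if new_cost < ce then (st.1.set e (some new_path), st.2.set e (some new_cost))
        else if new_cost = ce then
          match st.1.getD e none with
          | none => st
          | some pe =>
            if new_path.length < pe.length then (st.1.set e (some new_path), st.2) else st
        else st

def fssA_core (lookup : List (String × String)) (iso : PySem.Set String) (tgt : List Char) :
    Option (List String) :=
  let n := tgt.length
  let init : List (Option (List String)) × List (Option Int) :=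
    ((List.replicate (n + 1) (none : Option (List String))).set 0 (some []),
     (List.replicate (n + 1) (none : Option Int)).set 0 (some 0))
  let final := (List.range n).foldl
    (fun st index =>
      match st.1.getD index none with
      | none => st
      | some _ => [1, 2].foldl (fssA_inner lookup iso tgt n index) st)
    init
  final.1.getD n none

def find_symbol_sequence (text : String) (lookup : List (String × String)) (enable_isotopes : Bool) : Option (List String) :=
  let cleaned := normalize_text text
  if cleaned = "" then some []
  else
    let tgt := (PySem.Str.lower cleaned).toList
    let iso : PySem.Set String :=
      if enable_isotopes then PySem.Set.ofList ["D", "T"] else PySem.Set.ofList []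
    fssA_core lookup iso tgt

-- ===== PORT B =====

-- step(i, e): the (symbol, cost) of using target[i:e] as one token, or None
def fssStep (lookup : List (String × String)) (iso : PySem.Set String) (tgt : List Char)
    (i e : Nat) : Option (String × Int) :=
  let sym := fssCandidate tgt i e
  if ¬ PySem.Dict.contains (PySem.Dict.mk lookup) sym then none
  else some (sym, if PySem.Set.contains iso sym then 1 else 0)

-- the body of pass 1's `for i in (e - 2, e - 1)` loop
def fssB1_inner (lookup : List (String × String)) (iso : PySem.Set String) (tgt : List Char)
    (e : Nat) (b : List (Option (Int × Int))) (i : Int) : List (Option (Int × Int)) :=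
  if i < 0 then b
  else
    match b.getD i.toNat none with
    | none => b
    | some p =>
      match fssStep lookup iso tgt i.toNat e with
      | none => b
      | some tok =>
        let cand : Int × Int := (p.1 + tok.2, p.2 + 1)
        match b.getD e none with
        | none => b.set e (some cand)
        | some cur =>
          if cand.1 < cur.1 ∨ (cand.1 = cur.1 ∧ cand.2 < cur.2) then b.set e (some cand)
          else b

-- pass 1: best[e] = (min isotope cost, min token count), pulled from the two predecessors
def fssB1 (lookup : List (String × String)) (iso : PySem.Set String) (tgt : List Char) :
    List (Option (Int × Int)) :=
  let n := tgt.length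
  (List.range' 1 n).foldl
    (fun b (e : Nat) => [(e : Int) - 2, (e : Int) - 1].foldl (fssB1_inner lookup iso tgt e) b)
    ((List.replicate (n + 1) (none : Option (Int × Int))).set 0 (some (0, 0)))

-- pass 2: the `while j > 0` backward walk, appending symbols to `out`
def fssB_recon (lookup : List (String × String)) (iso : PySem.Set String) (tgt : List Char)
    (b : List (Option (Int × Int))) : Nat → List String → List String
  | 0, out => out
  | j + 1, out =>
    let use2 : Option String :=
      if j + 1 ≥ 2 then
        match fssStep lookup iso tgt (j - 1) (j + 1), b.getD (j - 1) none, b.getD (j + 1) none with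
        | some tok, some p, some cur =>
          if (p.1 + tok.2, p.2 + 1) = cur then some tok.1 else none
        | _, _, _ => none
      else none
    match use2 with
    | some sym => fssB_recon lookup iso tgt b (j - 1) (out ++ [sym])
    | none =>
      -- Python indexes into step(j-1, j); pass 1 guarantees it is present, "" is never used
      let sym1 := match fssStep lookup iso tgt j (j + 1) with
        | some tok => tok.1
        | none => ""
      fssB_recon lookup iso tgt b j (out ++ [sym1])
  termination_by j _ => j
  decreasing_by all_goals omega

def find_symbol_sequence_alt (text : String) (lookup : List (String × String)) (enable_isotopes : Bool) : Option (List String) :=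
  let cleaned := normalize_text text
  if cleaned = "" then some []
  else
    let tgt := (PySem.Str.lower cleaned).toList
    let iso : PySem.Set String :=
      if enable_isotopes then PySem.Set.ofList ["D", "T"] else PySem.Set.ofList []
    let b := fssB1 lookup iso tgt
    match b.getD tgt.length none with
    | none => none
    | some _ => some ((fssB_recon lookup iso tgt b tgt.length []).reverse)

-- ===== PRECONDITION & SPEC =====
def Spec_find_symbol_sequence (text : String) (lookup : List (String × String)) (enable_isotopes : Bool) (out : Option (List String)) : Prop := out = find_symbol_sequence_alt text lookup enable_isotopes
instance (text : String) (lookup : List (String × String)) (enable_isotopes : Bool) (out : Option (List String)) : Decidable (Spec_find_symbol_sequence text lookup enable_isotopes out) := by unfold Spec_find_symbol_sequence; infer_instance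

-- ===== CLAIM (what is proved, stated in full; the proofs are below) =====
def Claim_equal_find_symbol_sequence : Prop := ∀ (text : String) (lookup : List (String × String)) (enable_isotopes : Bool), Dom_find_symbol_sequence text lookup enable_isotopes → Spec_find_symbol_sequence text lookup enable_isotopes (find_symbol_sequence text lookup enable_isotopes)

-- ===== LEMMAS AND PROOFS =====

-- the candidate value reaching a cell through one token
def candVal (g : Option (Int × Int)) (s : Option (String × Int)) : Option (Int × Int) :=
  match g, s with
  | some p, some tok => some (p.1 + tok.2, p.2 + 1)
  | _, _ => none

-- lexicographic minimum, none = +infinity, ties keep the first argument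
def lexMin (a b : Option (Int × Int)) : Option (Int × Int) :=
  match a, b with
  | none, b => b
  | some x, none => some x
  | some x, some y => if y.1 < x.1 ∨ (y.1 = x.1 ∧ y.2 < x.2) then some y else some x

-- the DP value at each cell: min (isotope cost, token count) over segmentations of target[:j]
def specG (lookup : List (String × String)) (iso : PySem.Set String) (tgt : List Char) :
    Nat → Option (Int × Int)
  | 0 => some (0, 0)
  | 1 => candVal (specG lookup iso tgt 0) (fssStep lookup iso tgt 0 1)
  | j + 2 =>
    lexMin (candVal (specG lookup iso tgt j) (fssStep lookup iso tgt j (j + 2)))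
           (candVal (specG lookup iso tgt (j + 1)) (fssStep lookup iso tgt (j + 1) (j + 2)))

def symOr : Option (String × Int) → String
  | some tok => tok.1
  | none => ""

-- the canonical optimal path both programs agree on (2-char step preferred on ties)
def specP (lookup : List (String × String)) (iso : PySem.Set String) (tgt : List Char) :
    Nat → List String
  | 0 => []
  | 1 => [symOr (fssStep lookup iso tgt 0 1)]
  | j + 2 =>
    let c2 := candVal (specG lookup iso tgt j) (fssStep lookup iso tgt j (j + 2))
    if c2 ≠ none ∧ c2 = specG lookup iso tgt (j + 2) then
      specP lookup iso tgt j ++ [symOr (fssStep lookup iso tgt j (j + 2))]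
    else
      specP lookup iso tgt (j + 1) ++ [symOr (fssStep lookup iso tgt (j + 1) (j + 2))]


theorem getD_set_ne {a : Type} (l : List a) (i j : Nat) (x d : a) (h : i ≠ j) :
    (l.set i x).getD j d = l.getD j d := by
  simp [List.getD, List.getElem?_set_ne h]

theorem getD_set_self {a : Type} (l : List a) (i : Nat) (x d : a) (h : i < l.length) :
    (l.set i x).getD i d = x := by
  simp [List.getD, List.getElem?_set_self (by simpa using h)]

theorem lexMin_some {a b : Option (Int × Int)} {v : Int × Int} (h : lexMin a b = some v) :
    a = some v ∨ b = some v := by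
  cases a with
  | none => right; simpa [lexMin] using h
  | some x =>
    cases b with
    | none => left; simpa [lexMin] using h
    | some y =>
      simp only [lexMin] at h
      split_ifs at h
      · right; exact h
      · left; exact h

theorem specP_len (lookup : List (String × String)) (iso : PySem.Set String) (tgt : List Char) :
    ∀ j v, specG lookup iso tgt j = some v → ((specP lookup iso tgt j).length : Int) = v.2 := by
  intro j
  induction j using Nat.strong_induction_on with
  | _ j ih =>
    match j with
    | 0 =>
      intro v h
      rw [specG] at h
      injection h with h
      subst h
      simp [specP]
    | 1 =>
      intro v h
      simp only [specG] at h
      cases hs : fssStep lookup iso tgt 0 1 with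
      | none => rw [hs] at h; simp [candVal] at h
      | some tok =>
        rw [hs] at h
        simp only [candVal, Option.some.injEq] at h
        subst h
        simp [specP]
    | j + 2 =>
      intro v h
      have hG : specG lookup iso tgt (j + 2) = some v := h
      rw [specG] at h
      rw [specP]
      split_ifs with hc
      · have hc2 : candVal (specG lookup iso tgt j) (fssStep lookup iso tgt j (j + 2)) = some v :=
          hc.2.trans hG
        cases hg : specG lookup iso tgt j with
        | none => rw [hg] at hc2; simp [candVal] at hc2
        | some p =>
          cases hs : fssStep lookup iso tgt j (j + 2) with
          | none => rw [hg, hs] at hc2; simp [candVal] at hc2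
          | some tok =>
            rw [hg, hs] at hc2
            simp only [candVal, Option.some.injEq] at hc2
            subst hc2
            have hl := ih j (by omega) p hg
            simp only [List.length_append, List.length_cons, List.length_nil]
            push_cast
            omega
      · rcases lexMin_some h with hmem | hmem
        · exact absurd ⟨by simp [hmem], hmem.trans hG.symm⟩ hc
        · cases hg : specG lookup iso tgt (j + 1) with
          | none => rw [hg] at hmem; simp [candVal] at hmem
          | some p =>
            cases hs : fssStep lookup iso tgt (j + 1) (j + 2) with
            | none => rw [hg, hs] at hmem; simp [candVal] at hmem
            | some tok =>
              rw [hg, hs] at hmem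
              simp only [candVal, Option.some.injEq] at hmem
              subst hmem
              have hl := ih (j + 1) (by omega) p hg
              simp only [List.length_append, List.length_cons, List.length_nil]
              push_cast
              omega

-- ----- B side: pass 1 computes specG, pass 2 computes specP -----

def BInv (lookup : List (String × String)) (iso : PySem.Set String) (tgt : List Char)
    (k : Nat) (b : List (Option (Int × Int))) : Prop :=
  b.length = tgt.length + 1 ∧
  (∀ j, j ≤ k → b.getD j none = specG lookup iso tgt j) ∧
  (∀ j, k < j → b.getD j none = none)

theorem B_relax (lookup : List (String × String)) (iso : PySem.Set String) (tgt : List Char)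
    (e : Nat) (b : List (Option (Int × Int))) (i : Int) (hi : 0 ≤ i) (_hne : i.toNat ≠ e)
    (hlen : e < b.length) :
    (fssB1_inner lookup iso tgt e b i).length = b.length ∧
    (∀ j, j ≠ e → (fssB1_inner lookup iso tgt e b i).getD j none = b.getD j none) ∧
    (fssB1_inner lookup iso tgt e b i).getD e none
      = lexMin (b.getD e none)
          (candVal (b.getD i.toNat none) (fssStep lookup iso tgt i.toNat e)) := by
  unfold fssB1_inner
  rw [if_neg (by omega)]
  cases hg : b.getD i.toNat none with
  | none =>
    refine ⟨rfl, fun j hj => rfl, ?_⟩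
    cases b.getD e none <;> simp [candVal, lexMin]
  | some p =>
    cases hs : fssStep lookup iso tgt i.toNat e with
    | none =>
      refine ⟨rfl, fun j hj => rfl, ?_⟩
      cases b.getD e none <;> simp [candVal, lexMin]
    | some tok =>
      cases hc : b.getD e none with
      | none =>
        refine ⟨by simp, fun j hj => getD_set_ne _ _ _ _ _ (Ne.symm hj), ?_⟩
        rw [getD_set_self _ _ _ _ hlen]
        simp [candVal, lexMin]
      | some cur =>
        simp only [candVal, lexMin]
        split_ifs with hlt
        · exact ⟨by simp, fun j hj => getD_set_ne _ _ _ _ _ (Ne.symm hj),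
            by rw [getD_set_self _ _ _ _ hlen]⟩
        · exact ⟨rfl, fun j hj => rfl, hc⟩

theorem BInv_step (lookup : List (String × String)) (iso : PySem.Set String) (tgt : List Char)
    (k : Nat) (hk : k < tgt.length) (b : List (Option (Int × Int)))
    (h : BInv lookup iso tgt k b) :
    BInv lookup iso tgt (k + 1)
      ([((k + 1 : Nat) : Int) - 2, ((k + 1 : Nat) : Int) - 1].foldl
        (fssB1_inner lookup iso tgt (k + 1)) b) := by
  obtain ⟨hlen, hfin, hnone⟩ := h
  have hlt : k + 1 < b.length := by omega
  simp only [List.foldl_cons, List.foldl_nil]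
  cases k with
  | zero =>
    show BInv lookup iso tgt 1
      (fssB1_inner lookup iso tgt 1
        (fssB1_inner lookup iso tgt 1 b (((1 : Nat) : Int) - 2)) (((1 : Nat) : Int) - 1))
    have h1 : fssB1_inner lookup iso tgt 1 b (((1 : Nat) : Int) - 2) = b := by
      unfold fssB1_inner
      rw [if_pos (by norm_num)]
    rw [h1]
    obtain ⟨hl2, hoth, hcell⟩ :=
      B_relax lookup iso tgt 1 b (((1 : Nat) : Int) - 1) (by norm_num) (by norm_num)
        (by omega)
    refine ⟨by omega, ?_, ?_⟩
    · intro j hj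
      match j, hj with
      | 0, _ =>
        rw [hoth 0 (by omega)]
        exact hfin 0 (by omega)
      | 1, _ =>
        rw [hcell]
        have ht : (((1 : Nat) : Int) - 1).toNat = 0 := by norm_num
        rw [ht, hfin 0 (by omega), hnone 1 (by omega)]
        rw [show specG lookup iso tgt 1
            = candVal (specG lookup iso tgt 0) (fssStep lookup iso tgt 0 1) from rfl]
        cases candVal (specG lookup iso tgt 0) (fssStep lookup iso tgt 0 1) <;> simp [lexMin]
    · intro j hj
      rw [hoth j (by omega)]
      exact hnone j (by omega)
  | succ k' =>
    show BInv lookup iso tgt (k' + 2)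
      (fssB1_inner lookup iso tgt (k' + 2)
        (fssB1_inner lookup iso tgt (k' + 2) b (((k' + 2 : Nat) : Int) - 2))
        (((k' + 2 : Nat) : Int) - 1))
    have e2 : ((((k' + 2 : Nat)) : Int) - 2).toNat = k' := by omega
    have e1 : ((((k' + 2 : Nat)) : Int) - 1).toNat = k' + 1 := by omega
    obtain ⟨hl2, hoth2, hcell2⟩ :=
      B_relax lookup iso tgt (k' + 2) b (((k' + 2 : Nat) : Int) - 2) (by omega)
        (by omega) (by omega)
    set b1 := fssB1_inner lookup iso tgt (k' + 2) b (((k' + 2 : Nat) : Int) - 2) with hb1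
    obtain ⟨hl1, hoth1, hcell1⟩ :=
      B_relax lookup iso tgt (k' + 2) b1 (((k' + 2 : Nat) : Int) - 1) (by omega)
        (by omega) (by omega)
    refine ⟨by omega, ?_, ?_⟩
    · intro j hj
      rcases Nat.lt_or_ge j (k' + 2) with hj2 | hj2
      · rw [hoth1 j (by omega), hoth2 j (by omega)]
        exact hfin j (by omega)
      · have hj3 : j = k' + 2 := by omega
        subst hj3
        rw [hcell1, e1, hoth2 (k' + 1) (by omega), hfin (k' + 1) le_rfl, hcell2, e2,
          hfin k' (by omega), hnone (k' + 2) (by omega)]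
        conv_rhs => rw [specG]
        rfl
    · intro j hj
      rw [hoth1 j (by omega), hoth2 j (by omega)]
      exact hnone j (by omega)

theorem BInv_fold (lookup : List (String × String)) (iso : PySem.Set String) (tgt : List Char) :
    ∀ k, k ≤ tgt.length →
      BInv lookup iso tgt k
        ((List.range' 1 k).foldl
          (fun b (e : Nat) => [(e : Int) - 2, (e : Int) - 1].foldl (fssB1_inner lookup iso tgt e) b)
          ((List.replicate (tgt.length + 1) (none : Option (Int × Int))).set 0 (some (0, 0)))) := by
  intro k
  induction k with
  | zero =>
    intro _
    rw [List.range'_zero, List.foldl_nil]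
    refine ⟨by simp, ?_, ?_⟩
    · intro j hj
      interval_cases j
      rw [getD_set_self _ _ _ _ (by simp)]
      rfl
    · intro j hj
      rw [getD_set_ne _ _ _ _ _ (by omega), List.getD, List.getElem?_replicate]
      split_ifs <;> rfl
  | succ k ih =>
    intro hk
    rw [List.range'_1_concat, List.foldl_append]
    simp only [List.foldl_cons, List.foldl_nil]
    have := BInv_step lookup iso tgt k (by omega) _ (ih (by omega))
    simp only [List.foldl_cons, List.foldl_nil] at this
    rw [show 1 + k = k + 1 from by omega]
    exact this

theorem recon_eq (lookup : List (String × String)) (iso : PySem.Set String) (tgt : List Char)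
    (b : List (Option (Int × Int)))
    (hb : ∀ j, j ≤ tgt.length → b.getD j none = specG lookup iso tgt j) :
    ∀ j, j ≤ tgt.length → specG lookup iso tgt j ≠ none →
      ∀ out, fssB_recon lookup iso tgt b j out = out ++ (specP lookup iso tgt j).reverse := by
  intro j
  induction j using Nat.strong_induction_on with
  | _ j ih =>
    match j with
    | 0 => intro _ _ out; simp [fssB_recon, specP]
    | 1 =>
      intro hle hne out
      rw [fssB_recon]
      rw [if_neg (by omega : ¬ 0 + 1 ≥ 2)]
      simp only []
      rw [fssB_recon, specP]
      cases fssStep lookup iso tgt 0 1 <;> simp [symOr]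
    | j + 2 =>
      intro hle hne out
      cases hv : specG lookup iso tgt (j + 2) with
      | none => exact absurd hv hne
      | some v =>
        have hGb : b.getD (j + 2) none = some v := by rw [hb (j + 2) hle, hv]
        have hG : lexMin
            (candVal (specG lookup iso tgt j) (fssStep lookup iso tgt j (j + 2)))
            (candVal (specG lookup iso tgt (j + 1)) (fssStep lookup iso tgt (j + 1) (j + 2)))
            = some v := by rw [← specG]; exact hv
        show fssB_recon lookup iso tgt b (j + 1 + 1) out
          = out ++ (specP lookup iso tgt (j + 2)).reverse
        rw [fssB_recon]
        simp only [Nat.add_sub_cancel]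
        rw [if_pos (by omega : j + 1 + 1 ≥ 2), hGb, hb j (by omega)]
        rw [specP]
        cases hg2 : specG lookup iso tgt j with
        | some p =>
          cases hs : fssStep lookup iso tgt j (j + 2) with
          | some tok =>
            by_cases h2 : ((p.1 + tok.2, p.2 + 1) : Int × Int) = v
            · -- the 2-char step accounts for the cell: both sides take it
              simp only [if_pos h2]
              rw [ih j (by omega) (by omega) (by simp [hg2]) (out ++ [tok.1])]
              rw [if_pos ⟨by simp [candVal], by
                  rw [hv]; simp [candVal, h2]⟩]
              simp [symOr]
            · simp only [if_neg h2]
              have hc1 : candVal (specG lookup iso tgt (j + 1))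
                  (fssStep lookup iso tgt (j + 1) (j + 2)) = some v := by
                rcases lexMin_some hG with hm | hm
                · rw [hg2, hs] at hm; simp [candVal] at hm; exact absurd hm h2
                · exact hm
              cases hq : specG lookup iso tgt (j + 1) with
              | none => rw [hq] at hc1; simp [candVal] at hc1
              | some q =>
                rw [ih (j + 1) (by omega) (by omega) (by simp [hq]) _]
                rw [if_neg (by
                  rintro ⟨-, hcnd⟩
                  rw [hv] at hcnd
                  simp [candVal] at hcnd
                  exact h2 hcnd)]
                cases fssStep lookup iso tgt (j + 1) (j + 2) <;> simp [symOr]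
          | none =>
            have hc1 : candVal (specG lookup iso tgt (j + 1))
                (fssStep lookup iso tgt (j + 1) (j + 2)) = some v := by
              rcases lexMin_some hG with hm | hm
              · rw [hg2, hs] at hm; simp [candVal] at hm
              · exact hm
            cases hq : specG lookup iso tgt (j + 1) with
            | none => rw [hq] at hc1; simp [candVal] at hc1
            | some q =>
              rw [ih (j + 1) (by omega) (by omega) (by simp [hq]) _]
              rw [if_neg (by
                rintro ⟨hcne, -⟩
                simp [candVal] at hcne)]
              cases fssStep lookup iso tgt (j + 1) (j + 2) <;> simp [symOr]
        | none =>
          have hc1 : candVal (specG lookup iso tgt (j + 1))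
              (fssStep lookup iso tgt (j + 1) (j + 2)) = some v := by
            rcases lexMin_some hG with hm | hm
            · rw [hg2] at hm; simp [candVal] at hm
            · exact hm
          cases hq : specG lookup iso tgt (j + 1) with
          | none => rw [hq] at hc1; simp [candVal] at hc1
          | some q =>
            rw [ih (j + 1) (by omega) (by omega) (by simp [hq]) _]
            rw [if_neg (by
              rintro ⟨hcne, -⟩
              simp [candVal] at hcne)]
            cases fssStep lookup iso tgt (j + 1) (j + 2) <;> simp [symOr]

-- ----- A side: the path-carrying DP also computes (specG, specP) -----

def pcellVal (lookup : List (String × String)) (iso : PySem.Set String) (tgt : List Char)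
    (k : Nat) : Option (Int × Int) :=
  if k = 0 then none
  else candVal (specG lookup iso tgt (k - 1)) (fssStep lookup iso tgt (k - 1) (k + 1))

def pcellPath (lookup : List (String × String)) (iso : PySem.Set String) (tgt : List Char)
    (k : Nat) : List String :=
  specP lookup iso tgt (k - 1) ++ [symOr (fssStep lookup iso tgt (k - 1) (k + 1))]

def AInv (lookup : List (String × String)) (iso : PySem.Set String) (tgt : List Char)
    (k : Nat) (st : List (Option (List String)) × List (Option Int)) : Prop :=
  st.1.length = tgt.length + 1 ∧ st.2.length = tgt.length + 1 ∧
  (∀ j, j ≤ k →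
    st.1.getD j none = (specG lookup iso tgt j).map (fun _ => specP lookup iso tgt j) ∧
    st.2.getD j none = (specG lookup iso tgt j).map Prod.fst) ∧
  (k + 1 ≤ tgt.length →
    st.1.getD (k + 1) none
      = (pcellVal lookup iso tgt k).map (fun _ => pcellPath lookup iso tgt k) ∧
    st.2.getD (k + 1) none = (pcellVal lookup iso tgt k).map Prod.fst) ∧
  (∀ j, k + 1 < j → st.1.getD j none = none ∧ st.2.getD j none = none)

theorem specG_succ (lookup : List (String × String)) (iso : PySem.Set String) (tgt : List Char)
    (k : Nat) :
    specG lookup iso tgt (k + 1)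
      = lexMin (pcellVal lookup iso tgt k)
          (candVal (specG lookup iso tgt k) (fssStep lookup iso tgt k (k + 1))) := by
  cases k with
  | zero =>
    rw [show pcellVal lookup iso tgt 0 = none from rfl]
    rw [specG]
    cases candVal (specG lookup iso tgt 0) (fssStep lookup iso tgt 0 1) <;> rfl
  | succ k' =>
    rw [specG, pcellVal, if_neg (by omega)]
    rfl

theorem specP_succ_keep (lookup : List (String × String)) (iso : PySem.Set String)
    (tgt : List Char) (k : Nat) (u : Int × Int)
    (hu : pcellVal lookup iso tgt k = some u)
    (heq : specG lookup iso tgt (k + 1) = pcellVal lookup iso tgt k) :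
    specP lookup iso tgt (k + 1) = pcellPath lookup iso tgt k := by
  cases k with
  | zero => rw [show pcellVal lookup iso tgt 0 = none from rfl] at hu; cases hu
  | succ k' =>
    rw [pcellVal, if_neg (by omega)] at hu heq
    have hu' : candVal (specG lookup iso tgt k') (fssStep lookup iso tgt k' (k' + 2))
        = some u := hu
    have heq' : specG lookup iso tgt (k' + 2)
        = candVal (specG lookup iso tgt k') (fssStep lookup iso tgt k' (k' + 2)) := heq
    show specP lookup iso tgt (k' + 2)
      = specP lookup iso tgt k' ++ [symOr (fssStep lookup iso tgt k' (k' + 2))]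
    rw [specP, if_pos ⟨by simp [hu'], heq'.symm⟩]

theorem specP_succ_new (lookup : List (String × String)) (iso : PySem.Set String)
    (tgt : List Char) (k : Nat)
    (hne : pcellVal lookup iso tgt k = none
      ∨ pcellVal lookup iso tgt k ≠ specG lookup iso tgt (k + 1)) :
    specP lookup iso tgt (k + 1)
      = specP lookup iso tgt k ++ [symOr (fssStep lookup iso tgt k (k + 1))] := by
  cases k with
  | zero => rw [specP]; rfl
  | succ k' =>
    rw [pcellVal, if_neg (by omega)] at hne
    have hne' : candVal (specG lookup iso tgt k') (fssStep lookup iso tgt k' (k' + 2)) = none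
        ∨ candVal (specG lookup iso tgt k') (fssStep lookup iso tgt k' (k' + 2))
          ≠ specG lookup iso tgt (k' + 2) := hne
    show specP lookup iso tgt (k' + 2)
      = specP lookup iso tgt (k' + 1) ++ [symOr (fssStep lookup iso tgt (k' + 1) (k' + 2))]
    rw [specP, if_neg]
    rintro ⟨h1, h2⟩
    rcases hne' with hne' | hne'
    · exact h1 hne'
    · exact hne' h2

theorem pcellPath_len (lookup : List (String × String)) (iso : PySem.Set String)
    (tgt : List Char) (k : Nat) (u : Int × Int) (hu : pcellVal lookup iso tgt k = some u) :
    ((pcellPath lookup iso tgt k).length : Int) = u.2 := by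
  rw [pcellVal] at hu
  split_ifs at hu with h0
  cases hq : specG lookup iso tgt (k - 1) with
  | none => rw [hq] at hu; simp [candVal] at hu
  | some q =>
    cases hs : fssStep lookup iso tgt (k - 1) (k + 1) with
    | none => rw [hq, hs] at hu; simp [candVal] at hu
    | some tok =>
      rw [hq, hs] at hu
      simp only [candVal, Option.some.injEq] at hu
      subst hu
      rw [pcellPath]
      simp only [List.length_append, List.length_cons, List.length_nil]
      have := specP_len lookup iso tgt (k - 1) q hq
      push_cast
      omega

theorem AInv_step (lookup : List (String × String)) (iso : PySem.Set String) (tgt : List Char)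
    (k : Nat) (hk : k < tgt.length) (st : List (Option (List String)) × List (Option Int))
    (h : AInv lookup iso tgt k st) :
    AInv lookup iso tgt (k + 1)
      (match st.1.getD k none with
       | none => st
       | some _ => [1, 2].foldl (fssA_inner lookup iso tgt tgt.length k) st) := by
  obtain ⟨hL1, hL2, hfin, hpc, hnone⟩ := h
  obtain ⟨hkp, hkc⟩ := hfin k le_rfl
  obtain ⟨hp1, hc1⟩ := hpc (by omega)
  cases hg : specG lookup iso tgt k with
  | none =>
    rw [hg] at hkp hkc
    simp only [Option.map_none] at hkp hkc
    rw [hkp]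
    have hGs := specG_succ lookup iso tgt k
    rw [hg] at hGs
    have hGp : specG lookup iso tgt (k + 1) = pcellVal lookup iso tgt k := by
      rw [hGs]; cases pcellVal lookup iso tgt k <;> rfl
    refine ⟨hL1, hL2, ?_, ?_, fun j hj => hnone j (by omega)⟩
    · intro j hj
      rcases Nat.lt_or_ge j (k + 1) with hj2 | hj2
      · exact hfin j (by omega)
      · have hj3 : j = k + 1 := by omega
        subst hj3
        refine ⟨?_, by rw [hc1, hGp]⟩
        rw [hp1, hGp]
        cases hu : pcellVal lookup iso tgt k with
        | none => rfl
        | some u =>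
          simp only [Option.map_some]
          rw [specP_succ_keep lookup iso tgt k u hu (by rw [hGp])]
    · intro hle
      have hcell := hnone (k + 2) (by omega)
      have hpt : pcellVal lookup iso tgt (k + 1) = none := by
        rw [pcellVal, if_neg (by omega)]
        simp only [Nat.add_sub_cancel]
        rw [hg]
        rfl
      rw [hpt]
      exact ⟨by rw [hcell.1]; rfl, by rw [hcell.2]; rfl⟩
  | some v =>
    rw [hg] at hkp hkc
    simp only [Option.map_some] at hkp hkc
    rw [hkp]
    simp only [List.foldl_cons, List.foldl_nil]
    have hlv : ((specP lookup iso tgt k).length : Int) = v.2 := specP_len lookup iso tgt k v hg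
    have hGs := specG_succ lookup iso tgt k
    rw [hg] at hGs
    set st2 := fssA_inner lookup iso tgt tgt.length k st 1 with hdef
    have hmid : st2.1.length = tgt.length + 1 ∧ st2.2.length = tgt.length + 1 ∧
        (∀ j, j ≤ k + 1 →
          st2.1.getD j none = (specG lookup iso tgt j).map (fun _ => specP lookup iso tgt j) ∧
          st2.2.getD j none = (specG lookup iso tgt j).map Prod.fst) ∧
        (∀ j, k + 1 < j → st2.1.getD j none = none ∧ st2.2.getD j none = none) := by
      rw [hdef]
      unfold fssA_inner
      rw [if_neg (by omega : ¬ tgt.length < k + 1)]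
      by_cases hct : PySem.Dict.contains (PySem.Dict.mk lookup) (fssCandidate tgt k (k + 1)) = true
      · have hs1 : fssStep lookup iso tgt k (k + 1)
            = some (fssCandidate tgt k (k + 1),
                if PySem.Set.contains iso (fssCandidate tgt k (k + 1)) then 1 else 0) := by
          simp [fssStep, hct]
        rw [hs1] at hGs
        rw [if_neg (by simpa using hct), hkp, hkc, hc1]
        simp only [Option.getD_some]
        set w : Int := if PySem.Set.contains iso (fssCandidate tgt k (k + 1)) then 1 else 0
          with hw
        have hc1v : candVal (some v) (some (fssCandidate tgt k (k + 1), w))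
            = some (v.1 + w, v.2 + 1) := rfl
        rw [hc1v] at hGs
        cases hu : pcellVal lookup iso tgt k with
        | none =>
          simp only [Option.map_none]
          have hGv : specG lookup iso tgt (k + 1) = some (v.1 + w, v.2 + 1) := by
            rw [hGs, hu]; rfl
          have hPv : specP lookup iso tgt (k + 1)
              = specP lookup iso tgt k ++ [fssCandidate tgt k (k + 1)] := by
            rw [specP_succ_new lookup iso tgt k (Or.inl hu), hs1]; rfl
          refine ⟨by simp [hL1], by simp [hL2], ?_, ?_⟩
          · intro j hj
            rcases Nat.lt_or_ge j (k + 1) with hj2 | hj2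
            · obtain ⟨ha, hb⟩ := hfin j (by omega)
              exact ⟨by rw [getD_set_ne _ _ _ _ _ (by omega), ha],
                by rw [getD_set_ne _ _ _ _ _ (by omega), hb]⟩
            · have hj3 : j = k + 1 := by omega
              subst hj3
              rw [getD_set_self _ _ _ _ (by omega), getD_set_self _ _ _ _ (by omega)]
              rw [hGv, hPv]
              exact ⟨rfl, rfl⟩
          · intro j hj
            obtain ⟨ha, hb⟩ := hnone j hj
            exact ⟨by rw [getD_set_ne _ _ _ _ _ (by omega), ha],
              by rw [getD_set_ne _ _ _ _ _ (by omega), hb]⟩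
        | some u =>
          have hplen : ((pcellPath lookup iso tgt k).length : Int) = u.2 :=
            pcellPath_len lookup iso tgt k u hu
          rw [hp1, hu]
          simp only [Option.map_some]
          have hGm : specG lookup iso tgt (k + 1)
              = lexMin (some u) (some (v.1 + w, v.2 + 1)) := by rw [hGs, hu]
          by_cases hlt : v.1 + w < u.1
          · rw [if_pos hlt]
            have hGv : specG lookup iso tgt (k + 1) = some (v.1 + w, v.2 + 1) := by
              rw [hGm]
              simp only [lexMin]
              rw [if_pos (Or.inl hlt)]
            have hPv : specP lookup iso tgt (k + 1)
                = specP lookup iso tgt k ++ [fssCandidate tgt k (k + 1)] := by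
              rw [specP_succ_new lookup iso tgt k (Or.inr (by
                rw [hu, hGv]
                intro hx
                injection hx with hx
                have := congrArg Prod.fst hx
                simp at this
                omega)), hs1]
              rfl
            refine ⟨by simp [hL1], by simp [hL2], ?_, ?_⟩
            · intro j hj
              rcases Nat.lt_or_ge j (k + 1) with hj2 | hj2
              · obtain ⟨ha, hb⟩ := hfin j (by omega)
                exact ⟨by rw [getD_set_ne _ _ _ _ _ (by omega), ha],
                  by rw [getD_set_ne _ _ _ _ _ (by omega), hb]⟩
              · have hj3 : j = k + 1 := by omega
                subst hj3
                rw [getD_set_self _ _ _ _ (by omega), getD_set_self _ _ _ _ (by omega)]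
                rw [hGv, hPv]
                exact ⟨rfl, rfl⟩
            · intro j hj
              obtain ⟨ha, hb⟩ := hnone j hj
              exact ⟨by rw [getD_set_ne _ _ _ _ _ (by omega), ha],
                by rw [getD_set_ne _ _ _ _ _ (by omega), hb]⟩
          · rw [if_neg hlt]
            by_cases heq : v.1 + w = u.1
            · rw [if_pos heq]
              by_cases hl2 : (specP lookup iso tgt k ++ [fssCandidate tgt k (k + 1)]).length
                  < (pcellPath lookup iso tgt k).length
              · rw [if_pos hl2]
                have hv2 : v.2 + 1 < u.2 := by
                  simp only [List.length_append, List.length_cons, List.length_nil] at hl2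
                  omega
                have hGv : specG lookup iso tgt (k + 1) = some (v.1 + w, v.2 + 1) := by
                  rw [hGm]
                  simp only [lexMin]
                  rw [if_pos (Or.inr ⟨heq, hv2⟩)]
                have hPv : specP lookup iso tgt (k + 1)
                    = specP lookup iso tgt k ++ [fssCandidate tgt k (k + 1)] := by
                  rw [specP_succ_new lookup iso tgt k (Or.inr (by
                    rw [hu, hGv]
                    intro hx
                    injection hx with hx
                    have := congrArg Prod.snd hx
                    simp at this
                    omega)), hs1]
                  rfl
                refine ⟨by simp [hL1], hL2, ?_, ?_⟩
                · intro j hj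
                  rcases Nat.lt_or_ge j (k + 1) with hj2 | hj2
                  · obtain ⟨ha, hb⟩ := hfin j (by omega)
                    exact ⟨by rw [getD_set_ne _ _ _ _ _ (by omega), ha], hb⟩
                  · have hj3 : j = k + 1 := by omega
                    subst hj3
                    rw [getD_set_self _ _ _ _ (by omega)]
                    rw [hGv, hPv]
                    refine ⟨rfl, ?_⟩
                    rw [hc1, hu]
                    simp only [Option.map_some]
                    rw [← heq]
                · intro j hj
                  obtain ⟨ha, hb⟩ := hnone j hj
                  exact ⟨by rw [getD_set_ne _ _ _ _ _ (by omega), ha], hb⟩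
              · rw [if_neg hl2]
                have hv2 : ¬ v.2 + 1 < u.2 := by
                  simp only [List.length_append, List.length_cons, List.length_nil] at hl2
                  omega
                have hGv : specG lookup iso tgt (k + 1) = pcellVal lookup iso tgt k := by
                  rw [hGm, hu]
                  simp only [lexMin]
                  rw [if_neg (by
                    rintro (hx | ⟨-, hx⟩)
                    · exact hlt hx
                    · exact hv2 hx)]
                refine ⟨hL1, hL2, ?_, ?_⟩
                · intro j hj
                  rcases Nat.lt_or_ge j (k + 1) with hj2 | hj2
                  · exact hfin j (by omega)
                  · have hj3 : j = k + 1 := by omega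
                    subst hj3
                    rw [hp1, hc1, hGv, hu]
                    simp only [Option.map_some]
                    rw [specP_succ_keep lookup iso tgt k u hu (by rw [hGv])]
                    constructor <;> trivial
                · exact fun j hj => hnone j hj
            · rw [if_neg heq]
              have hGv : specG lookup iso tgt (k + 1) = pcellVal lookup iso tgt k := by
                rw [hGm, hu]
                simp only [lexMin]
                rw [if_neg (by
                  rintro (hx | ⟨hx, -⟩)
                  · exact hlt hx
                  · exact heq hx)]
              refine ⟨hL1, hL2, ?_, ?_⟩
              · intro j hj
                rcases Nat.lt_or_ge j (k + 1) with hj2 | hj2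
                · exact hfin j (by omega)
                · have hj3 : j = k + 1 := by omega
                  subst hj3
                  rw [hp1, hc1, hGv, hu]
                  simp only [Option.map_some]
                  rw [specP_succ_keep lookup iso tgt k u hu (by rw [hGv])]
                  constructor <;> trivial
              · exact fun j hj => hnone j hj
      · have hs1 : fssStep lookup iso tgt k (k + 1) = none := by
          simp [fssStep, hct]
        rw [hs1] at hGs
        rw [if_pos (by simpa using hct)]
        have hGp : specG lookup iso tgt (k + 1) = pcellVal lookup iso tgt k := by
          rw [hGs]
          rw [show candVal (some v) none = none from rfl]
          cases pcellVal lookup iso tgt k <;> rfl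
        refine ⟨hL1, hL2, ?_, ?_⟩
        · intro j hj
          rcases Nat.lt_or_ge j (k + 1) with hj2 | hj2
          · exact hfin j (by omega)
          · have hj3 : j = k + 1 := by omega
            subst hj3
            refine ⟨?_, by rw [hc1, hGp]⟩
            rw [hp1, hGp]
            cases hu : pcellVal lookup iso tgt k with
            | none => rfl
            | some u =>
              simp only [Option.map_some]
              rw [specP_succ_keep lookup iso tgt k u hu (by rw [hGp])]
        · exact fun j hj => hnone j hj
    -- ===== stage 2: e = k + 2 =====
    clear hdef
    obtain ⟨hm1, hm2, hmfin, hmnone⟩ := hmid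
    show AInv lookup iso tgt (k + 1) (fssA_inner lookup iso tgt tgt.length k st2 2)
    unfold fssA_inner
    by_cases hle : tgt.length < k + 2
    · rw [if_pos hle]
      exact ⟨hm1, hm2, hmfin, by intro hx; omega, fun j hj => hmnone j (by omega)⟩
    · rw [if_neg hle]
      by_cases hct2 : PySem.Dict.contains (PySem.Dict.mk lookup) (fssCandidate tgt k (k + 2)) = true
      · have hs2 : fssStep lookup iso tgt k (k + 2)
            = some (fssCandidate tgt k (k + 2),
                if PySem.Set.contains iso (fssCandidate tgt k (k + 2)) then 1 else 0) := by
          simp [fssStep, hct2]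
        rw [if_neg (by simpa using hct2)]
        obtain ⟨hk2p, hk2c⟩ := hmfin k (by omega)
        rw [hg] at hk2p hk2c
        simp only [Option.map_some] at hk2p hk2c
        rw [hk2p, hk2c, (hmnone (k + 2) (by omega)).2]
        simp only [Option.getD_some]
        set w2 : Int := if PySem.Set.contains iso (fssCandidate tgt k (k + 2)) then 1 else 0
          with hw2
        have hpt : pcellVal lookup iso tgt (k + 1) = some (v.1 + w2, v.2 + 1) := by
          rw [pcellVal, if_neg (by omega)]
          simp only [Nat.add_sub_cancel]
          rw [hg, show (k + 1 + 1) = k + 2 from rfl, hs2]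
          rfl
        have hppath : pcellPath lookup iso tgt (k + 1)
            = specP lookup iso tgt k ++ [fssCandidate tgt k (k + 2)] := by
          rw [pcellPath]
          simp only [Nat.add_sub_cancel]
          rw [show (k + 1 + 1) = k + 2 from rfl, hs2]
          rfl
        refine ⟨by simp [hm1], by simp [hm2], ?_, ?_, ?_⟩
        · intro j hj
          obtain ⟨ha, hb⟩ := hmfin j hj
          exact ⟨by rw [getD_set_ne _ _ _ _ _ (by omega), ha],
            by rw [getD_set_ne _ _ _ _ _ (by omega), hb]⟩
        · intro hle2
          rw [getD_set_self _ _ _ _ (by omega), getD_set_self _ _ _ _ (by omega)]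
          rw [hpt, hppath]
          exact ⟨rfl, rfl⟩
        · intro j hj
          obtain ⟨ha, hb⟩ := hmnone j (by omega)
          exact ⟨by rw [getD_set_ne _ _ _ _ _ (by omega), ha],
            by rw [getD_set_ne _ _ _ _ _ (by omega), hb]⟩
      · have hs2 : fssStep lookup iso tgt k (k + 2) = none := by
          simp [fssStep, hct2]
        rw [if_pos (by simpa using hct2)]
        have hpt : pcellVal lookup iso tgt (k + 1) = none := by
          rw [pcellVal, if_neg (by omega)]
          simp only [Nat.add_sub_cancel]
          rw [hg, show (k + 1 + 1) = k + 2 from rfl, hs2]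
          rfl
        refine ⟨hm1, hm2, hmfin, ?_, fun j hj => hmnone j (by omega)⟩
        intro hle2
        obtain ⟨ha, hb⟩ := hmnone (k + 2) (by omega)
        rw [hpt]
        exact ⟨by rw [ha]; rfl, by rw [hb]; rfl⟩

theorem AInv_fold (lookup : List (String × String)) (iso : PySem.Set String) (tgt : List Char) :
    ∀ k, k ≤ tgt.length →
      AInv lookup iso tgt k
        ((List.range k).foldl
          (fun st index =>
            match st.1.getD index none with
            | none => st
            | some _ => [1, 2].foldl (fssA_inner lookup iso tgt tgt.length index) st)
          ((List.replicate (tgt.length + 1) (none : Option (List String))).set 0 (some []),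
           (List.replicate (tgt.length + 1) (none : Option Int)).set 0 (some 0))) := by
  intro k
  induction k with
  | zero =>
    intro _
    simp only [List.range_zero, List.foldl_nil]
    refine ⟨by simp, by simp, ?_, ?_, ?_⟩
    · intro j hj
      interval_cases j
      rw [getD_set_self _ _ _ _ (by simp), getD_set_self _ _ _ _ (by simp)]
      exact ⟨rfl, rfl⟩
    · intro hle
      rw [show pcellVal lookup iso tgt 0 = none from rfl]
      constructor <;>
      · rw [getD_set_ne _ _ _ _ _ (by omega), List.getD, List.getElem?_replicate]
        split_ifs <;> rfl
    · intro j hj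
      constructor <;>
      · rw [getD_set_ne _ _ _ _ _ (by omega), List.getD, List.getElem?_replicate]
        split_ifs <;> rfl
  | succ k ih =>
    intro hk
    rw [List.range_succ, List.foldl_append]
    simp only [List.foldl_cons, List.foldl_nil]
    exact AInv_step lookup iso tgt k (by omega) _ (ih (by omega))

theorem A_core_spec (lookup : List (String × String)) (iso : PySem.Set String) (tgt : List Char) :
    fssA_core lookup iso tgt
      = (specG lookup iso tgt tgt.length).map (fun _ => specP lookup iso tgt tgt.length) := by
  have h := AInv_fold lookup iso tgt tgt.length le_rfl
  exact (h.2.2.1 tgt.length le_rfl).1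

theorem B_core_spec (lookup : List (String × String)) (iso : PySem.Set String) (tgt : List Char) :
    (match (fssB1 lookup iso tgt).getD tgt.length none with
     | none => none
     | some _ => some ((fssB_recon lookup iso tgt (fssB1 lookup iso tgt) tgt.length []).reverse))
      = (specG lookup iso tgt tgt.length).map (fun _ => specP lookup iso tgt tgt.length) := by
  obtain ⟨hbl, hbfin, hbnone⟩ :
      BInv lookup iso tgt tgt.length (fssB1 lookup iso tgt) :=
    BInv_fold lookup iso tgt tgt.length le_rfl
  rw [hbfin tgt.length le_rfl]
  cases hv : specG lookup iso tgt tgt.length with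
  | none => rfl
  | some v =>
    simp only [Option.map_some]
    rw [recon_eq lookup iso tgt (fssB1 lookup iso tgt) hbfin tgt.length le_rfl (by simp [hv]) []]
    simp

-- ===== VERDICT (by name: the statement is the Claim_ definition above) =====
theorem find_symbol_sequence_spec : Claim_equal_find_symbol_sequence := by
  intro text lookup enable_isotopes _
  unfold Spec_find_symbol_sequence
  simp only [find_symbol_sequence, find_symbol_sequence_alt]
  split_ifs
  · rfl
  all_goals rw [A_core_spec, ← B_core_spec]
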